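-- pv_equiv track=rewrite | github.com/LLH1818/leetcode | Partition_Array_into_Disjoint_Intervals.py | partitionDisjoint1
-- ===== SOURCE A (Python) =====
-- def partitionDisjoint1(A):        #  一个一个比  太慢
--     """
--     :type A: List[int]
--     :rtype: int
--     """
--     for i in range(A.__len__()):
--         black_flag = 0
--         left = A[: i + 1]
--         right = A[i + 1:]
--         for rnum in right:
--             for lnum in left:
--                 if lnum > rnum:
--                     black_flag = 1
--                     break
--             if black_flag == 1:
--                 break
--         if black_flag == 0:
--             return i + 1
-- ===== SOURCE B (Python) =====
-- def partitionDisjoint1(A):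
--     # Single pass: left_max = max of current left part, cur_max = running max;
--     # extend the left part whenever an element dips below left_max.
--     left_max = A[0]
--     cur_max = A[0]
--     idx = 0
--     for i in range(1, len(A)):
--         x = A[i]
--         if x > cur_max:
--             cur_max = x
--         if x < left_max:
--             idx = i
--             left_max = cur_max
--     return idx + 1
-- ===== Notes on version B (the rewrite author's own statement) =====
-- stated objective: faster
-- what changed: Replaced A's triple loop (for each cut point, scan every left/right pair) by a single pass that maintains the left-part maximum and a running maximum, extending the left part whenever an element dips below the left maximum.
-- outside the precondition, e.g. on partitionDisjoint1([]): A returns None, B raises IndexError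
import Mathlib
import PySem

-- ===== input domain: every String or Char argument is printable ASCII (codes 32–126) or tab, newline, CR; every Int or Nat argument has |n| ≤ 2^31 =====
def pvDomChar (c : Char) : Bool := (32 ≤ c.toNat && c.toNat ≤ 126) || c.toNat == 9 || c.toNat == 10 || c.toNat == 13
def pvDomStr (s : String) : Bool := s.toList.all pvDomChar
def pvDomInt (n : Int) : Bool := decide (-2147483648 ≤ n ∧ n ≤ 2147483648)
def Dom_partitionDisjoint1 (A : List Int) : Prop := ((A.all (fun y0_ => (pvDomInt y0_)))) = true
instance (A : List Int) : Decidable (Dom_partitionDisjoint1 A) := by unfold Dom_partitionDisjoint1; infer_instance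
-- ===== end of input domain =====

-- B replaces A's cubic scan of every (cut, left element, right element) triple by a
-- single left-to-right pass tracking the left-part maximum and a running maximum.

-- ===== PORT A =====
-- inner 'for lnum in left: if lnum > rnum: black_flag = 1; break'
def pvInnerL (rnum : Int) : List Int → Int
  | [] => 0
  | l :: ls => if l > rnum then 1 else pvInnerL rnum ls

-- middle 'for rnum in right: …; if black_flag == 1: break'
def pvInnerR (left : List Int) : List Int → Int
  | [] => 0
  | r :: rs => if pvInnerL r left = 1 then 1 else pvInnerR left rs

-- outer 'for i in range(len(A)): … if black_flag == 0: return i + 1'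
def pvALoop (A : List Int) : List Int → Int
  | [] => 0    -- loop ends without returning: Python returns None (excluded by Pre_)
  | i :: rest =>
      let left := PySem.List.slice A none (some (i + 1))
      let right := PySem.List.slice A (some (i + 1)) none
      if pvInnerR left right = 0 then i + 1 else pvALoop A rest

def partitionDisjoint1 (A : List Int) : Int :=
  pvALoop A (PySem.List.pyRange 0 (PySem.List.len A) 1)

-- ===== PORT B =====
-- 'for i in range(1, len(A)):' with state (left_max, cur_max, idx)
def pvBLoop (A : List Int) (leftMax curMax idx : Int) : List Int → Int
  | [] => idx + 1
  | i :: rest =>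
      let x := PySem.List.pyGetD A i 0
      let curMax' := if x > curMax then x else curMax
      if x < leftMax then pvBLoop A curMax' curMax' i rest
      else pvBLoop A leftMax curMax' idx rest

def partitionDisjoint1_alt (A : List Int) : Int :=
  match PySem.List.pyGet? A 0 with
  | none => 0    -- A[0] raises IndexError on []: excluded by Pre_
  | some a => pvBLoop A a a 0 (PySem.List.pyRange 1 (PySem.List.len A) 1)

-- ===== PRECONDITION & SPEC =====
-- Pre_ excludes only the empty list, on which A falls off the loop and returns None (not an int) and B raises IndexError.
def Pre_partitionDisjoint1 (A : List Int) : Prop := A ≠ []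
instance (A : List Int) : Decidable (Pre_partitionDisjoint1 A) := by unfold Pre_partitionDisjoint1; infer_instance
def pvWitness_partitionDisjoint1 : List Int := [1, 0, 2]

def Spec_partitionDisjoint1 (A : List Int) (out : Int) : Prop := out = partitionDisjoint1_alt A
instance (A : List Int) (out : Int) : Decidable (Spec_partitionDisjoint1 A out) := by unfold Spec_partitionDisjoint1; infer_instance

-- ===== CLAIM (what is proved, stated in full; the proofs are below) =====
def Claim_equal_partitionDisjoint1 : Prop := ∀ (A : List Int), Dom_partitionDisjoint1 A → Pre_partitionDisjoint1 A → Spec_partitionDisjoint1 A (partitionDisjoint1 A)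

-- ===== LEMMAS AND PROOFS =====

-- 'cut after k elements is valid': every left element ≤ every right element
def pvValid (A : List Int) (k : Nat) : Prop :=
  ∀ x ∈ A.take k, ∀ y ∈ A.drop k, x ≤ y

lemma pvInnerL_eq_zero (r : Int) (left : List Int) :
    pvInnerL r left = 0 ↔ ∀ l ∈ left, l ≤ r := by
  induction left with
  | nil => simp [pvInnerL]
  | cons a as ih =>
      simp only [pvInnerL]
      by_cases h : a > r
      · simp [h]
      · simp [h, ih]; omega

lemma pvInnerL_ne_one (r : Int) (left : List Int) (h : pvInnerL r left ≠ 1) :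
    pvInnerL r left = 0 := by
  induction left with
  | nil => simp [pvInnerL]
  | cons c cs ih =>
      simp only [pvInnerL] at h ⊢
      by_cases hc : c > r
      · simp [hc] at h
      · simp [hc] at h ⊢; exact ih h

lemma pvInnerR_eq_zero (left right : List Int) :
    pvInnerR left right = 0 ↔ ∀ r ∈ right, ∀ l ∈ left, l ≤ r := by
  induction right with
  | nil => simp [pvInnerR]
  | cons b bs ih =>
      simp only [pvInnerR]
      by_cases h : pvInnerL b left = 1
      · simp only [h]
        constructor
        · intro hc; exact absurd hc (by norm_num)
        · intro hall
          have h0 : pvInnerL b left = 0 := (pvInnerL_eq_zero b left).2 (hall b (by simp))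
          omega
      · have h0 := pvInnerL_ne_one b left h
        rw [if_neg h, ih]
        constructor
        · intro hb r hr l hl
          rcases List.mem_cons.1 hr with hrb | hr'
          · rw [hrb]; exact (pvInnerL_eq_zero b left).1 h0 l hl
          · exact hb r hr' l hl
        · intro hall r hr l hl
          exact hall r (List.mem_cons_of_mem _ hr) l hl

lemma pvALoop_eq (A : List Int) (t : Nat) (ht : t < A.length)
    (hv : pvValid A (t + 1)) (hmin : ∀ k : Nat, k < t → ¬ pvValid A (k + 1)) :
    ∀ d j : Nat, t - j = d → j ≤ t →
      pvALoop A (PySem.List.pyRange (j : Int) (A.length : Int) 1) = (t : Int) + 1 := by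
  intro d
  induction d with
  | zero =>
      intro j hd hj
      have hjt : j = t := by omega
      subst hjt
      rw [PySem.List.pyRange_one_cons (by exact_mod_cast ht)]
      simp only [pvALoop]
      have hL : PySem.List.slice A none (some ((j : Int) + 1)) = A.take (j + 1) := by
        have := PySem.List.slice_to_natCast (xs := A) (b := j + 1)
        push_cast at this ⊢
        exact this
      have hR : PySem.List.slice A (some ((j : Int) + 1)) none = A.drop (j + 1) := by
        have := PySem.List.slice_from_natCast (xs := A) (a := j + 1)
        push_cast at this ⊢
        exact this
      rw [hL, hR]
      have : pvInnerR (A.take (j + 1)) (A.drop (j + 1)) = 0 := by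
        rw [pvInnerR_eq_zero]
        intro r hr l hl
        exact hv l hl r hr
      simp [this]
  | succ d ih =>
      intro j hd hj
      have hjlt : j < t := by omega
      rw [PySem.List.pyRange_one_cons (by exact_mod_cast (by omega : j < A.length))]
      simp only [pvALoop]
      have hL : PySem.List.slice A none (some ((j : Int) + 1)) = A.take (j + 1) := by
        have := PySem.List.slice_to_natCast (xs := A) (b := j + 1)
        push_cast at this ⊢
        exact this
      have hR : PySem.List.slice A (some ((j : Int) + 1)) none = A.drop (j + 1) := by
        have := PySem.List.slice_from_natCast (xs := A) (a := j + 1)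
        push_cast at this ⊢
        exact this
      rw [hL, hR]
      have hnz : ¬ pvInnerR (A.take (j + 1)) (A.drop (j + 1)) = 0 := by
        rw [pvInnerR_eq_zero]
        intro hall
        exact hmin j hjlt (fun x hx y hy => hall y hy x hx)
      have hrec := ih (j + 1) (by omega) (by omega)
      push_cast at hrec ⊢
      simp [hnz, hrec]

-- invariant of B's single pass after the first i elements have been scanned
def pvInv (A : List Int) (i : Nat) (leftMax curMax : Int) (idx : Nat) : Prop :=
  idx < i ∧
  leftMax ∈ A.take (idx + 1) ∧ (∀ z ∈ A.take (idx + 1), z ≤ leftMax) ∧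
  curMax ∈ A.take i ∧ (∀ z ∈ A.take i, z ≤ curMax) ∧
  (∀ y ∈ (A.take i).drop (idx + 1), leftMax ≤ y) ∧
  (∀ k : Nat, 1 ≤ k → k ≤ idx → ∃ l ∈ A.take k, ∃ r ∈ (A.take i).drop k, r < l)

lemma pvTake_succ_of_lt (A : List Int) (i : Nat) (hi : i < A.length) :
    A.take (i + 1) = A.take i ++ [A[i]] := by
  rw [List.take_add_one]
  simp [List.getElem?_eq_getElem hi]

lemma pvInv_step (A : List Int) (i : Nat) (leftMax curMax : Int) (idx : Nat)
    (hi : i < A.length) (hinv : pvInv A i leftMax curMax idx) :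
    (A[i] < leftMax →
      pvInv A (i + 1) (if A[i] > curMax then A[i] else curMax)
        (if A[i] > curMax then A[i] else curMax) i) ∧
    (¬ A[i] < leftMax →
      pvInv A (i + 1) leftMax (if A[i] > curMax then A[i] else curMax) idx) := by
  obtain ⟨h1, h2, h3, h4, h5, h6, h7⟩ := hinv
  set x := A[i] with hx
  set cM' := if x > curMax then x else curMax with hcM'
  have htake : A.take (i + 1) = A.take i ++ [x] := pvTake_succ_of_lt A i hi
  have hlen : (A.take i).length = i := List.length_take_of_le (by omega)
  have hcMle : curMax ≤ cM' := by rw [hcM']; split <;> omega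
  have hxle : x ≤ cM' := by rw [hcM']; split <;> omega
  have hcM'mem : cM' ∈ A.take (i + 1) := by
    rw [htake, hcM']
    split
    · exact List.mem_append_right _ (by simp)
    · exact List.mem_append_left _ h4
  have hcM'ub : ∀ z ∈ A.take (i + 1), z ≤ cM' := by
    intro z hz
    rw [htake] at hz
    rcases List.mem_append.1 hz with hz' | hz'
    · exact le_trans (h5 z hz') hcMle
    · simp at hz'; omega
  have hdropapp : ∀ k : Nat, k ≤ i →
      (A.take (i + 1)).drop k = (A.take i).drop k ++ [x] := by
    intro k hk
    rw [htake, List.drop_append_of_le_length (by omega)]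
  constructor
  · -- reset branch: x < leftMax, new idx = i, new leftMax = cM'
    intro hlt
    refine ⟨by omega, hcM'mem, hcM'ub, hcM'mem, hcM'ub, ?_, ?_⟩
    · intro y hy
      have : (A.take (i + 1)).length ≤ i + 1 := by simp
      rw [List.drop_eq_nil_of_le this] at hy
      simp at hy
    · intro k hk1 hk2
      by_cases hkidx : k ≤ idx
      · obtain ⟨l, hl, r, hr, hrl⟩ := h7 k hk1 hkidx
        exact ⟨l, hl, r, by rw [hdropapp k (by omega)]; exact List.mem_append_left _ hr, hrl⟩
      · refine ⟨leftMax, ?_, x, ?_, hlt⟩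
        · have h' : A.take (idx + 1) = (A.take k).take (idx + 1) := by
            rw [List.take_take, Nat.min_eq_left (by omega)]
          exact List.take_subset _ _ (h' ▸ h2)
        · rw [hdropapp k (by omega)]; exact List.mem_append_right _ (by simp)
  · -- extend branch: x ≥ leftMax, idx unchanged
    intro hge
    refine ⟨by omega, h2, h3, hcM'mem, hcM'ub, ?_, ?_⟩
    · intro y hy
      rw [hdropapp (idx + 1) (by omega)] at hy
      rcases List.mem_append.1 hy with hy' | hy'
      · exact h6 y hy'
      · simp at hy'; omega
    · intro k hk1 hk2
      obtain ⟨l, hl, r, hr, hrl⟩ := h7 k hk1 hk2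
      exact ⟨l, hl, r, by rw [hdropapp k (by omega)]; exact List.mem_append_left _ hr, hrl⟩

lemma pvBLoop_spec (A : List Int) :
    ∀ d i : Nat, A.length - i = d → 1 ≤ i → i ≤ A.length →
    ∀ (leftMax curMax : Int) (idx : Nat), pvInv A i leftMax curMax idx →
    ∃ (idxF : Nat) (lF cF : Int), pvInv A A.length lF cF idxF ∧
      pvBLoop A leftMax curMax (idx : Int) (PySem.List.pyRange (i : Int) (A.length : Int) 1)
        = (idxF : Int) + 1 := by
  intro d
  induction d with
  | zero =>
      intro i hd h1 h2 leftMax curMax idx hinv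
      have hin : i = A.length := by omega
      subst hin
      refine ⟨idx, leftMax, curMax, hinv, ?_⟩
      rw [PySem.List.pyRange_one_eq_nil (by omega)]
      simp [pvBLoop]
  | succ d ih =>
      intro i hd h1 h2 leftMax curMax idx hinv
      have hi : i < A.length := by omega
      rw [PySem.List.pyRange_one_cons (by exact_mod_cast hi)]
      simp only [pvBLoop]
      have hxget : PySem.List.pyGetD A (i : Int) 0 = A[i] := by
        rw [PySem.List.pyGetD_natCast]
        exact List.getD_eq_getElem A 0 hi
      rw [hxget]
      have hstep := pvInv_step A i leftMax curMax idx hi hinv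
      by_cases hlt : A[i] < leftMax
      · rw [if_pos hlt]
        have hrec := ih (i + 1) (by omega) (by omega) (by omega)
          (if A[i] > curMax then A[i] else curMax)
          (if A[i] > curMax then A[i] else curMax) i (hstep.1 hlt)
        push_cast at hrec ⊢
        exact hrec
      · rw [if_neg hlt]
        have hrec := ih (i + 1) (by omega) (by omega) (by omega)
          leftMax (if A[i] > curMax then A[i] else curMax) idx (hstep.2 hlt)
        push_cast at hrec ⊢
        exact hrec

lemma pvInv_final (A : List Int) (lF cF : Int) (idxF : Nat)
    (h : pvInv A A.length lF cF idxF) :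
    idxF < A.length ∧ pvValid A (idxF + 1) ∧ ∀ k : Nat, k < idxF → ¬ pvValid A (k + 1) := by
  obtain ⟨h1, h2, h3, h4, h5, h6, h7⟩ := h
  rw [List.take_length] at h6 h7
  refine ⟨h1, ?_, ?_⟩
  · intro x hx y hy
    have hxle : x ≤ lF := h3 x hx
    have hly : lF ≤ y := h6 y hy
    omega
  · intro k hk hvalid
    obtain ⟨l, hl, r, hr, hrl⟩ := h7 (k + 1) (by omega) (by omega)
    have := hvalid l hl r hr
    omega

-- ===== VERDICT (by name: the statement is the Claim_ definition above) =====
theorem partitionDisjoint1_spec : Claim_equal_partitionDisjoint1 := by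
  intro A _ hpre
  unfold Spec_partitionDisjoint1
  match A, hpre with
  | a :: rest, _ =>
    have hbase : pvInv (a :: rest) 1 a a 0 := by
      refine ⟨by omega, by simp, by simp, by simp, by simp, by simp, ?_⟩
      intro k hk1 hk2; omega
    obtain ⟨idxF, lF, cF, hinv, heq⟩ :=
      pvBLoop_spec (a :: rest) ((a :: rest).length - 1) 1 rfl (by omega) (by simp) a a 0 hbase
    obtain ⟨hlt, hv, hmin⟩ := pvInv_final (a :: rest) lF cF idxF hinv
    have hAeq := pvALoop_eq (a :: rest) idxF hlt hv hmin idxF 0 (by omega) (by omega)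
    unfold partitionDisjoint1 partitionDisjoint1_alt
    rw [PySem.List.pyGet?_zero_cons]
    rw [PySem.List.len_eq]
    push_cast at hAeq heq ⊢
    rw [hAeq, heq]
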